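-- pv_equiv track=rewrite | github.com/JIT-LSM/JIT_LSM | eval/CaseStudy_eval.py | has_non_empty_array
-- ===== SOURCE A (Python) =====
-- def has_non_empty_array(text):
--     # 方法1：直接遍历字符串（100%可靠）
--     for i in range(len(text)):
--         if text[i] == '[':
--             # 检查 [ 后面是否有非空白、非 ] 的字符
--             j = i + 1
--             while j < len(text) and text[j].isspace():
--                 j += 1
--             if j < len(text) and text[j] != ']':
--                 return True
--     return False
-- ===== SOURCE B (Python) =====
-- def has_non_empty_array(text):
--     # One pass: `pending` means we have seen a '[' followed so far only by whitespace.
--     pending = False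
--     for c in text:
--         if pending and not c.isspace() and c != ']':
--             return True
--         pending = (pending and c.isspace()) or c == '['
--     return False
-- ===== Notes on version B (the rewrite author's own statement) =====
-- stated objective: alternative
-- what changed: Replaces A's outer index loop with a nested whitespace-rescan after every '[' by a single left-to-right pass that carries one boolean state ('saw a [ followed so far only by whitespace'), so the inner while loop disappears.
import Mathlib
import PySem

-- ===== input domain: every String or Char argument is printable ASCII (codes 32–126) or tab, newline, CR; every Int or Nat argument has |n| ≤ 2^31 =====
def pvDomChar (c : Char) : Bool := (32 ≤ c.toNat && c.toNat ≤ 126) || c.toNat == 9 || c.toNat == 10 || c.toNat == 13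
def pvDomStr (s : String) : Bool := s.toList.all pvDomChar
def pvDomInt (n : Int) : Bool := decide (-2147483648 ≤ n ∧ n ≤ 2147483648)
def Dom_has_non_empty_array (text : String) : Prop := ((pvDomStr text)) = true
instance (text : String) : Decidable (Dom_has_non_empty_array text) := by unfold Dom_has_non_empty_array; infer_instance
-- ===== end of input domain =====

-- B replaces A's rescan-after-every-'[' with a single left-to-right pass carrying one boolean state (alternative one-pass formulation).

-- ===== PORT A =====
-- inner while loop: advance j while j < len(text) and text[j].isspace()
def pvSkipWs (cs : List Char) (j : Nat) : Nat :=
  if h : j < cs.length ∧ PySem.Chars.isspace (cs.getD j ' ') = true then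
    pvSkipWs cs (j + 1)
  else j
termination_by cs.length - j
decreasing_by omega

-- outer for loop over i in range(len(text))
def pvLoopA (cs : List Char) (i : Nat) : Bool :=
  if h : i < cs.length then
    if cs.getD i ' ' = '[' then
      let j := pvSkipWs cs (i + 1)
      if j < cs.length ∧ cs.getD j ' ' ≠ ']' then true
      else pvLoopA cs (i + 1)
    else pvLoopA cs (i + 1)
  else false
termination_by cs.length - i
decreasing_by all_goals omega

def has_non_empty_array (text : String) : Bool := pvLoopA text.toList 0

-- ===== PORT B =====
def pvLoopB (cs : List Char) (pending : Bool) : Bool :=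
  match cs with
  | [] => false
  | c :: rest =>
    if pending = true ∧ ¬ PySem.Chars.isspace c = true ∧ c ≠ ']' then true
    else pvLoopB rest ((pending && PySem.Chars.isspace c) || c = '[')

def has_non_empty_array_alt (text : String) : Bool := pvLoopB text.toList false

-- ===== PRECONDITION & SPEC =====
def Spec_has_non_empty_array (text : String) (out : Bool) : Prop := out = has_non_empty_array_alt text
instance (text : String) (out : Bool) : Decidable (Spec_has_non_empty_array text out) := by unfold Spec_has_non_empty_array; infer_instance

-- ===== CLAIM (what is proved, stated in full; the proofs are below) =====
def Claim_equal_has_non_empty_array : Prop := ∀ (text : String), Dom_has_non_empty_array text → Spec_has_non_empty_array text (has_non_empty_array text)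

-- ===== LEMMAS AND PROOFS =====

-- suffix reformulation of A's outer loop
def pvLoopAs (cs : List Char) : Bool :=
  match cs with
  | [] => false
  | c :: rest =>
    if c = '[' then
      match rest.dropWhile (fun d => PySem.Chars.isspace d) with
      | [] => pvLoopAs rest
      | d :: _ => if d ≠ ']' then true else pvLoopAs rest
    else pvLoopAs rest

-- "first non-space char exists and is not ']'"
def pvP (cs : List Char) : Bool :=
  match cs.dropWhile (fun d => PySem.Chars.isspace d) with
  | [] => false
  | d :: _ => d ≠ ']'

theorem pvSkipWs_drop (cs : List Char) (j : Nat) :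
    cs.drop (pvSkipWs cs j) = (cs.drop j).dropWhile (fun d => PySem.Chars.isspace d) := by
  unfold pvSkipWs
  split
  · rename_i h
    obtain ⟨hj, hs⟩ := h
    have hd : cs.drop j = cs[j] :: cs.drop (j + 1) := List.drop_eq_getElem_cons hj
    have := pvSkipWs_drop cs (j + 1)
    rw [this, hd, List.dropWhile_cons]
    simp [List.getD_eq_getElem?_getD, List.getElem?_eq_getElem hj] at hs
    simp [hs]
  · rename_i h
    rcases Nat.lt_or_ge j cs.length with hj | hj
    · have hd : cs.drop j = cs[j] :: cs.drop (j + 1) := List.drop_eq_getElem_cons hj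
      have hs : ¬ PySem.Chars.isspace (cs.getD j ' ') = true := by tauto
      rw [hd, List.dropWhile_cons]
      simp [List.getD_eq_getElem?_getD, List.getElem?_eq_getElem hj] at hs
      simp [hs]
    · simp [List.drop_eq_nil_of_le hj, List.dropWhile_nil]
termination_by cs.length - j
decreasing_by omega

theorem pvSkipWs_cond (cs : List Char) (j : Nat) :
    (decide (pvSkipWs cs j < cs.length ∧ cs.getD (pvSkipWs cs j) ' ' ≠ ']')) = pvP (cs.drop j) := by
  have hdrop := pvSkipWs_drop cs j
  unfold pvP
  rw [← hdrop]
  rcases Nat.lt_or_ge (pvSkipWs cs j) cs.length with hlt | hge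
  · have hd : cs.drop (pvSkipWs cs j) = cs[pvSkipWs cs j] :: cs.drop (pvSkipWs cs j + 1) :=
      List.drop_eq_getElem_cons hlt
    rw [hd]
    simp [List.getD_eq_getElem?_getD, hlt]
  · have : cs.drop (pvSkipWs cs j) = [] := List.drop_eq_nil_of_le hge
    rw [this]
    simp
    omega

theorem pvP_cons (c : Char) (rest : List Char) :
    pvP (c :: rest) = if PySem.Chars.isspace c = true then pvP rest else decide (c ≠ ']') := by
  unfold pvP
  rw [List.dropWhile_cons]
  by_cases h : PySem.Chars.isspace c = true <;> simp [h]

theorem pvLoopA_eq_As (cs : List Char) (i : Nat) :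
    pvLoopA cs i = pvLoopAs (cs.drop i) := by
  unfold pvLoopA
  split
  · rename_i hi
    have hd : cs.drop i = cs[i] :: cs.drop (i + 1) := List.drop_eq_getElem_cons hi
    have hget : cs.getD i ' ' = cs[i] := by
      simp [List.getD_eq_getElem?_getD, List.getElem?_eq_getElem hi]
    have ih := pvLoopA_eq_As cs (i + 1)
    rw [hd, pvLoopAs, hget]
    by_cases hb : cs[i] = '['
    · simp only [hb, if_pos]
      have hc : (pvSkipWs cs (i + 1) < cs.length ∧ cs.getD (pvSkipWs cs (i + 1)) ' ' ≠ ']')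
          ↔ pvP (cs.drop (i + 1)) = true := by
        rw [← pvSkipWs_cond cs (i + 1)]
        exact (decide_eq_true_iff).symm
      by_cases hcond : pvSkipWs cs (i + 1) < cs.length ∧ cs.getD (pvSkipWs cs (i + 1)) ' ' ≠ ']'
      · rw [if_pos hcond]
        have hp : pvP (cs.drop (i + 1)) = true := hc.mp hcond
        unfold pvP at hp
        rcases hdw : (cs.drop (i + 1)).dropWhile (fun d => PySem.Chars.isspace d) with _ | ⟨d, r⟩
        · rw [hdw] at hp; simp at hp
        · rw [hdw] at hp
          simp only [decide_eq_true_iff] at hp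
          simp [hp]
      · rw [if_neg hcond, ih]
        have hp : ¬ pvP (cs.drop (i + 1)) = true := fun h => hcond (hc.mpr h)
        unfold pvP at hp
        rcases hdw : (cs.drop (i + 1)).dropWhile (fun d => PySem.Chars.isspace d) with _ | ⟨d, r⟩
        · rfl
        · rw [hdw] at hp
          simp only [decide_eq_true_iff] at hp
          simp at hp
          simp [hp]
    · simp [hb, ih]
  · rename_i hi
    rw [List.drop_eq_nil_of_le (by omega), pvLoopAs]
termination_by cs.length - i
decreasing_by all_goals omega

theorem pvLoopB_eq (cs : List Char) (pending : Bool) :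
    pvLoopB cs pending = ((pending && pvP cs) || pvLoopAs cs) := by
  induction cs generalizing pending with
  | nil => simp [pvLoopB, pvP, pvLoopAs]
  | cons c rest ih =>
    rw [pvLoopB, ih, pvLoopAs, pvP_cons]
    by_cases hsp : PySem.Chars.isspace c = true
    · have hb : c ≠ '[' := by
        intro h; rw [h] at hsp; simp [PySem.Chars.isspace] at hsp
      have hr : c ≠ ']' := by
        intro h; rw [h] at hsp; simp [PySem.Chars.isspace] at hsp
      simp [hsp, hb, hr]
    · by_cases hr : c = ']'
      · subst hr
        simp [hsp]
      · by_cases hb : c = '['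
        · subst hb
          simp [hsp, pvP]
          cases hdw : rest.dropWhile (fun d => PySem.Chars.isspace d) with
          | nil => simp
          | cons d r =>
            by_cases hdd : d = ']' <;> simp [hdd]
        · simp [hsp, hr, hb]

-- ===== VERDICT (by name: the statement is the Claim_ definition above) =====
theorem has_non_empty_array_spec : Claim_equal_has_non_empty_array := by
  intro text _
  unfold Spec_has_non_empty_array has_non_empty_array has_non_empty_array_alt
  rw [pvLoopA_eq_As, pvLoopB_eq]
  simp
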